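-- pv_equiv track=rewrite | github.com/flatsurf/surface-dynamics | surface_dynamics/misc/generalized_multiple_zeta_values.py | to_Z3
-- ===== SOURCE A (Python) =====
-- def to_Z3(den_tuple, sort=True):
--     a = b = c = d = e = f = g = 0
--     for v,p in den_tuple:
--         v = tuple(v)
--         if len(v) != 3:
--             raise ValueError
--         if v == (1,0,0):
--             a = p
--         elif v == (0,1,0):
--             b = p
--         elif v == (0,0,1):
--             c = p
--         elif v == (1,1,0):
--             d = p
--         elif v == (1,0,1):
--             e = p
--         elif v == (0,1,1):
--             f = p
--         elif v == (1,1,1):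
--             g = p
--         else:
--             return
--     # now normalize
--     if sort:
--         a,b,c,d,e,f,g = Z3_sort_abc(a,b,c,d,e,f,g)
--         if b == c:
--             if a == b:
--                 d,e,f = sorted([d,e,f], reverse=True)
--             else:
--                 d,e = sorted([d,e], reverse=True)
--     return a,b,c,d,e,f,g
--
-- def Z3_sort_abc(a,b,c,d,e,f,g):
--     if b > a:
--         if c > b:
--             # c > b > a
--             a,b,c,d,e,f,g = c,b,a,f,e,d,g
--         elif c > a:
--             # b >= c > a
--             a,b,c,d,e,f,g = b,c,a,f,d,e,g
--         else:
--             # b > a >= c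
--             a,b,c,d,e,f,g = b,a,c,d,f,e,g
--     elif c > a:
--         # c > a >= b
--         a,b,c,d,e,f,g = c,a,b,e,f,d,g
--     elif c > b:
--         # a >= c >= b
--         a,b,c,d,e,f,g = a,c,b,e,d,f,g
--     else:
--         pass
--     assert a >= b >= c
--     return a,b,c,d,e,f,g
-- ===== SOURCE B (Python) =====
-- _Z3_KEYS = {(1, 0, 0): 0, (0, 1, 0): 1, (0, 0, 1): 2,
--             (1, 1, 0): 3, (1, 0, 1): 4, (0, 1, 1): 5, (1, 1, 1): 6}
--
-- def to_Z3(den_tuple, sort=True):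
--     slots = [0] * 7
--     for v, p in den_tuple:
--         v = tuple(v)
--         if len(v) != 3:
--             raise ValueError
--         i = _Z3_KEYS.get(v)
--         if i is None:
--             return
--         slots[i] = p
--     a, b, c, d, e, f, g = slots
--     if sort:
--         vals = [a, b, c]
--         perm = sorted(range(3), key=lambda i: -vals[i])
--         edge = {(0, 1): d, (0, 2): e, (1, 2): f}
--         a, b, c = vals[perm[0]], vals[perm[1]], vals[perm[2]]
--         d = edge[tuple(sorted((perm[0], perm[1])))]
--         e = edge[tuple(sorted((perm[0], perm[2])))]
--         f = edge[tuple(sorted((perm[1], perm[2])))]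
--         if b == c:
--             if a == b:
--                 d, e, f = sorted([d, e, f], reverse=True)
--             else:
--                 d, e = sorted([d, e], reverse=True)
--     return a, b, c, d, e, f, g
-- ===== Notes on version B (the rewrite author's own statement) =====
-- stated objective: alternative
-- what changed: B replaces A's 7-way elif bucketing with a dict-indexed slot array and replaces the hardcoded 6-branch Z3_sort_abc case tree with a stable descending permutation sort of the three vertex weights plus an edge-table relabelling; the b==c tie step is kept.
-- outside the precondition, e.g. on to_Z3([([1, 0], 2)], True): A raises ValueError, B raises ValueError
import Mathlib
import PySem

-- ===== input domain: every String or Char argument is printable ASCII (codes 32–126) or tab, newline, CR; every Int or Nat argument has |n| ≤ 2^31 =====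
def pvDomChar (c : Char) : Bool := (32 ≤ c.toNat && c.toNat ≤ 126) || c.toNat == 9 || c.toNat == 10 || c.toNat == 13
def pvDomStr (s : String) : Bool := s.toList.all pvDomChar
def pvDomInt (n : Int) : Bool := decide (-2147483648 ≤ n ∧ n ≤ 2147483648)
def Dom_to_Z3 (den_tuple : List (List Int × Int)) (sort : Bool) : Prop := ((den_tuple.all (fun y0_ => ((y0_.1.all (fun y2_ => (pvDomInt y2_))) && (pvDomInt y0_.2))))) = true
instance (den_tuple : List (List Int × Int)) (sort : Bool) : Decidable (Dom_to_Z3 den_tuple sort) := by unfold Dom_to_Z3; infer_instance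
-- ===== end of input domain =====

-- B replaces A's hardcoded 6-branch Z3_sort_abc case tree by a dict-indexed bucketing loop plus a
-- stable descending permutation sort of the three vertex weights with an edge-table relabelling
-- (objective: alternative decomposition, same cost). Equivalence is about return values; A raises
-- ValueError on vectors of length ≠ 3, which Pre_ excludes.

-- ===== PORT A =====
-- sorted([...], reverse=True) unpacked into its elements (always 3 resp. 2 elements; fallback unreachable)
def pvSortedRev3 (d e f : Int) : Int × Int × Int :=
  match PySem.List.sorted [d, e, f] (fun x => x) true with
  | [x, y, z] => (x, y, z)
  | _ => (d, e, f)

def pvSortedRev2 (d e : Int) : Int × Int :=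
  match PySem.List.sorted [d, e] (fun x => x) true with
  | [x, y] => (x, y)
  | _ => (d, e)

def Z3_sort_abc (a b c d e f g : Int) : Int × Int × Int × Int × Int × Int × Int :=
  if b > a then
    if c > b then (c, b, a, f, e, d, g)
    else if c > a then (b, c, a, f, d, e, g)
    else (b, a, c, d, f, e, g)
  else if c > a then (c, a, b, e, f, d, g)
  else if c > b then (a, c, b, e, d, f, g)
  else (a, b, c, d, e, f, g)

-- the for-loop: state (a,b,c,d,e,f,g); none = 'return' on an unknown exponent vector
-- (length ≠ 3 raises ValueError in Python; such inputs are outside Pre_to_Z3)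
def to_Z3_loopA : List (List Int × Int) → (Int × Int × Int × Int × Int × Int × Int) →
    Option (Int × Int × Int × Int × Int × Int × Int)
  | [], st => some st
  | (v, p) :: rest, (a, b, c, d, e, f, g) =>
    if v.length ≠ 3 then none
    else if v = [1, 0, 0] then to_Z3_loopA rest (p, b, c, d, e, f, g)
    else if v = [0, 1, 0] then to_Z3_loopA rest (a, p, c, d, e, f, g)
    else if v = [0, 0, 1] then to_Z3_loopA rest (a, b, p, d, e, f, g)
    else if v = [1, 1, 0] then to_Z3_loopA rest (a, b, c, p, e, f, g)
    else if v = [1, 0, 1] then to_Z3_loopA rest (a, b, c, d, p, f, g)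
    else if v = [0, 1, 1] then to_Z3_loopA rest (a, b, c, d, e, p, g)
    else if v = [1, 1, 1] then to_Z3_loopA rest (a, b, c, d, e, f, p)
    else none

def to_Z3 (den_tuple : List (List Int × Int)) (sort : Bool) :
    Option (Int × Int × Int × Int × Int × Int × Int) :=
  match to_Z3_loopA den_tuple (0, 0, 0, 0, 0, 0, 0) with
  | none => none
  | some (a₀, b₀, c₀, d₀, e₀, f₀, g₀) =>
    if sort then
      let (a, b, c, d, e, f, g) := Z3_sort_abc a₀ b₀ c₀ d₀ e₀ f₀ g₀
      if b = c then
        if a = b then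
          let (d', e', f') := pvSortedRev3 d e f
          some (a, b, c, d', e', f', g)
        else
          let (d', e') := pvSortedRev2 d e
          some (a, b, c, d', e', f, g)
      else some (a, b, c, d, e, f, g)
    else some (a₀, b₀, c₀, d₀, e₀, f₀, g₀)

-- ===== PORT B =====
-- _Z3_KEYS.get(v)
def z3KeyIdx (v : List Int) : Option Nat :=
  if v = [1, 0, 0] then some 0
  else if v = [0, 1, 0] then some 1
  else if v = [0, 0, 1] then some 2
  else if v = [1, 1, 0] then some 3
  else if v = [1, 0, 1] then some 4
  else if v = [0, 1, 1] then some 5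
  else if v = [1, 1, 1] then some 6
  else none

-- the bucketing loop over the 7-slot list; slots[i] = p is List.set
def to_Z3_loopB : List (List Int × Int) → List Int → Option (List Int)
  | [], slots => some slots
  | (v, p) :: rest, slots =>
    if v.length ≠ 3 then none
    else match z3KeyIdx v with
      | none => none
      | some i => to_Z3_loopB rest (slots.set i p)

-- edge dict {(0,1): d, (0,2): e, (1,2): f} looked up at a sorted index pair (keys reached are
-- exactly the three present, so the total-function rendering is exact there)
def z3Edge (d e f : Int) (i j : Nat) : Int :=
  let k := if i ≤ j then (i, j) else (j, i)
  if k = (0, 1) then d else if k = (0, 2) then e else f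

-- the permutation block of Source B: stable descending sort of the vertex weights, edge relabelling
def z3PermSort (a b c d e f g : Int) : Int × Int × Int × Int × Int × Int × Int :=
  let vals := [a, b, c]
  let perm := PySem.List.sorted [(0 : Nat), 1, 2] (fun i => -(vals.getD i 0)) false
  let p0 := perm.getD 0 0
  let p1 := perm.getD 1 0
  let p2 := perm.getD 2 0
  (vals.getD p0 0, vals.getD p1 0, vals.getD p2 0,
   z3Edge d e f p0 p1, z3Edge d e f p0 p2, z3Edge d e f p1 p2, g)

def to_Z3_alt (den_tuple : List (List Int × Int)) (sort : Bool) :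
    Option (Int × Int × Int × Int × Int × Int × Int) :=
  match to_Z3_loopB den_tuple [0, 0, 0, 0, 0, 0, 0] with
  | none => none
  | some slots =>
    let a₀ := slots.getD 0 0
    let b₀ := slots.getD 1 0
    let c₀ := slots.getD 2 0
    let d₀ := slots.getD 3 0
    let e₀ := slots.getD 4 0
    let f₀ := slots.getD 5 0
    let g₀ := slots.getD 6 0
    if sort then
      let (a, b, c, d, e, f, g) := z3PermSort a₀ b₀ c₀ d₀ e₀ f₀ g₀
      if b = c then
        if a = b then
          let (d', e', f') := pvSortedRev3 d e f
          some (a, b, c, d', e', f', g)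
        else
          let (d', e') := pvSortedRev2 d e
          some (a, b, c, d', e', f, g)
      else some (a, b, c, d, e, f, g)
    else some (a₀, b₀, c₀, d₀, e₀, f₀, g₀)

-- ===== PRECONDITION & SPEC =====
-- Pre_ excludes exactly the inputs on which Python A raises ValueError: those where the first
-- entry whose vector is not one of the seven recognized keys has length ≠ 3 (entries after the
-- first unrecognized vector are never reached, since A returns None there).
def pvZ3Keys : List (List Int) :=
  [[1, 0, 0], [0, 1, 0], [0, 0, 1], [1, 1, 0], [1, 0, 1], [0, 1, 1], [1, 1, 1]]

def Pre_to_Z3 (den_tuple : List (List Int × Int)) (sort : Bool) : Prop :=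
  ((den_tuple.dropWhile (fun x => decide (x.1 ∈ pvZ3Keys))).head?.all
    (fun x => x.1.length == 3)) = true
instance (den_tuple : List (List Int × Int)) (sort : Bool) : Decidable (Pre_to_Z3 den_tuple sort) := by
  unfold Pre_to_Z3; infer_instance

def pvWitness_to_Z3 : (List (List Int × Int)) × Bool :=
  ([([1, 0, 0], 2), ([0, 1, 0], 5), ([1, 1, 0], 1)], true)

def Spec_to_Z3 (den_tuple : List (List Int × Int)) (sort : Bool) (out : Option (Int × Int × Int × Int × Int × Int × Int)) : Prop := out = to_Z3_alt den_tuple sort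
instance (den_tuple : List (List Int × Int)) (sort : Bool) (out : Option (Int × Int × Int × Int × Int × Int × Int)) : Decidable (Spec_to_Z3 den_tuple sort out) := by unfold Spec_to_Z3; exact @Option.instDecidableEq _ (fun a b => instDecidableEqProd a b) out (to_Z3_alt den_tuple sort)

-- ===== CLAIM (what is proved, stated in full; the proofs are below) =====
def Claim_equal_to_Z3 : Prop := ∀ (den_tuple : List (List Int × Int)) (sort : Bool), Dom_to_Z3 den_tuple sort → Pre_to_Z3 den_tuple sort → Spec_to_Z3 den_tuple sort (to_Z3 den_tuple sort)

-- ===== LEMMAS AND PROOFS =====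

-- B's slot list tracks A's 7-tuple state
theorem loopB_eq_loopA (l : List (List Int × Int)) :
    ∀ a b c d e f g : Int,
      to_Z3_loopB l [a, b, c, d, e, f, g] =
        (to_Z3_loopA l (a, b, c, d, e, f, g)).map
          (fun s => [s.1, s.2.1, s.2.2.1, s.2.2.2.1, s.2.2.2.2.1, s.2.2.2.2.2.1, s.2.2.2.2.2.2]) := by
  induction l with
  | nil => intro a b c d e f g; rfl
  | cons hd rest ih =>
    intro a b c d e f g
    obtain ⟨v, p⟩ := hd
    by_cases h3 : v.length ≠ 3
    · simp [to_Z3_loopA, to_Z3_loopB, h3]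
    · by_cases h1 : v = [1, 0, 0]
      · simp [to_Z3_loopA, to_Z3_loopB, z3KeyIdx, h3, h1, List.set, ih]
      · by_cases h2 : v = [0, 1, 0]
        · simp [to_Z3_loopA, to_Z3_loopB, z3KeyIdx, h3, h1, h2, List.set, ih]
        · by_cases h4 : v = [0, 0, 1]
          · simp [to_Z3_loopA, to_Z3_loopB, z3KeyIdx, h3, h1, h2, h4, List.set, ih]
          · by_cases h5 : v = [1, 1, 0]
            · simp [to_Z3_loopA, to_Z3_loopB, z3KeyIdx, h3, h1, h2, h4, h5, List.set, ih]
            · by_cases h6 : v = [1, 0, 1]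
              · simp [to_Z3_loopA, to_Z3_loopB, z3KeyIdx, h3, h1, h2, h4, h5, h6, List.set, ih]
              · by_cases h7 : v = [0, 1, 1]
                · simp [to_Z3_loopA, to_Z3_loopB, z3KeyIdx, h3, h1, h2, h4, h5, h6, h7, List.set, ih]
                · by_cases h8 : v = [1, 1, 1]
                  · simp [to_Z3_loopA, to_Z3_loopB, z3KeyIdx, h3, h1, h2, h4, h5, h6, h7, h8, List.set, ih]
                  · simp [to_Z3_loopA, to_Z3_loopB, z3KeyIdx, h3, h1, h2, h4, h5, h6, h7, h8]

-- the permutation-based normalization agrees with A's hardcoded case tree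
theorem norm_eq (a b c d e f g : Int) :
    z3PermSort a b c d e f g = Z3_sort_abc a b c d e f g := by
  by_cases h1 : a < b <;> by_cases h2 : b < c <;> by_cases h3 : a < c <;>
    simp [z3PermSort, Z3_sort_abc, PySem.List.sorted, PySem.List.insertBy, z3Edge,
          h1, h2, h3, not_lt.mp, gt_iff_lt, List.getD]

theorem to_Z3_eq (den_tuple : List (List Int × Int)) (sort : Bool) :
    to_Z3 den_tuple sort = to_Z3_alt den_tuple sort := by
  unfold to_Z3 to_Z3_alt
  rw [loopB_eq_loopA]
  cases hA : to_Z3_loopA den_tuple (0, 0, 0, 0, 0, 0, 0) with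
  | none => rfl
  | some st =>
    obtain ⟨a, b, c, d, e, f, g⟩ := st
    cases sort with
    | false => simp [List.getD]
    | true => simp only [Option.map, List.getD_cons_zero, List.getD_cons_succ, norm_eq, if_true]

-- ===== VERDICT (by name: the statement is the Claim_ definition above) =====
theorem to_Z3_spec : Claim_equal_to_Z3 := by
  intro den_tuple sort _ _
  unfold Spec_to_Z3
  exact to_Z3_eq den_tuple sort
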